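-- pv_equiv track=rewrite | github.com/kirill-kondrashov/lean-misc | tools/problem1_odd_profile_search.py | section_split_at_zero
-- ===== SOURCE A (Python) =====
-- from typing import Dict, Iterable, List, Sequence, Set, Tuple
--
-- Family = Tuple[int, ...]
--
-- def section_split_at_zero(family: Sequence[int]) -> Tuple[Family, Family]:
--     with_zero: List[int] = []
--     without_zero: List[int] = []
--     for member in family:
--         section_member = member >> 1
--         if member & 1:
--             with_zero.append(section_member)
--         else:
--             without_zero.append(section_member)
--     return tuple(sorted(with_zero)), tuple(sorted(without_zero))
-- ===== SOURCE B (Python) =====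
-- def section_split_at_zero(family):
--     # Sort once by the shifted value, then partition in a single pass:
--     # each group comes out already sorted.
--     with_zero = []
--     without_zero = []
--     for member in sorted(family, key=lambda m: m >> 1):
--         if member & 1:
--             with_zero.append(member >> 1)
--         else:
--             without_zero.append(member >> 1)
--     return tuple(with_zero), tuple(without_zero)
-- ===== Notes on version B (the rewrite author's own statement) =====
-- stated objective: alternative
-- what changed: A partitions by parity and then sorts each group separately; B sorts the whole input once by the shifted value and partitions in a single pass, so each group emerges already sorted and no per-group sort is needed.
import Mathlib
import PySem

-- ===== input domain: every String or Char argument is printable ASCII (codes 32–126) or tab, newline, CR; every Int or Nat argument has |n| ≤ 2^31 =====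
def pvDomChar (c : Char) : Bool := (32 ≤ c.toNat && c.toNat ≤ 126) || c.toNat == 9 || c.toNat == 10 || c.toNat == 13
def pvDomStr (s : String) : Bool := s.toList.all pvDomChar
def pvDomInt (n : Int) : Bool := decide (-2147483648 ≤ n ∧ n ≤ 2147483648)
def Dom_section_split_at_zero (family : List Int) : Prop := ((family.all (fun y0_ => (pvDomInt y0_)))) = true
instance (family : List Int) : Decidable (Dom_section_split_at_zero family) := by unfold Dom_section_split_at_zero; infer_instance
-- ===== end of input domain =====

-- B sorts the whole input once by the shifted value and partitions in one pass (A partitions then sorts each group); same results, different decomposition.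


-- ===== PORT A =====
def section_split_at_zero (family : List Int) : List Int × List Int :=
  let st := family.foldl
    (fun (acc : List Int × List Int) (member : Int) =>
      let section_member : Int := member >>> 1
      if PySem.Int.band member 1 ≠ 0 then (acc.1 ++ [section_member], acc.2)
      else (acc.1, acc.2 ++ [section_member]))
    ([], [])
  (PySem.List.sorted st.1 (fun x => x) false, PySem.List.sorted st.2 (fun x => x) false)

-- ===== PORT B =====
def section_split_at_zero_alt (family : List Int) : List Int × List Int :=
  (PySem.List.sorted family (fun m => m >>> 1) false).foldl
    (fun (acc : List Int × List Int) (member : Int) =>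
      if PySem.Int.band member 1 ≠ 0 then (acc.1 ++ [member >>> 1], acc.2)
      else (acc.1, acc.2 ++ [member >>> 1]))
    ([], [])

-- ===== PRECONDITION & SPEC =====
def Spec_section_split_at_zero (family : List Int) (out : List Int × List Int) : Prop := out = section_split_at_zero_alt family
instance (family : List Int) (out : List Int × List Int) : Decidable (Spec_section_split_at_zero family out) := by unfold Spec_section_split_at_zero; infer_instance

-- ===== CLAIM (what is proved, stated in full; the proofs are below) =====
def Claim_equal_section_split_at_zero : Prop := ∀ (family : List Int), Dom_section_split_at_zero family → Spec_section_split_at_zero family (section_split_at_zero family)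

-- ===== LEMMAS AND PROOFS =====

def pvOdd (m : Int) : Bool := decide (PySem.Int.band m 1 ≠ 0)

def pvSh (m : Int) : Int := m >>> 1

-- the shared partition loop equals filter+map
theorem pv_fold_part (xs : List Int) (w z : List Int) :
    xs.foldl
      (fun (acc : List Int × List Int) (member : Int) =>
        if PySem.Int.band member 1 ≠ 0 then (acc.1 ++ [member >>> 1], acc.2)
        else (acc.1, acc.2 ++ [member >>> 1]))
      (w, z)
    = (w ++ (xs.filter pvOdd).map pvSh, z ++ (xs.filter (fun m => !pvOdd m)).map pvSh) := by
  induction xs generalizing w z with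
  | nil => simp
  | cons a t ih =>
    by_cases h : PySem.Int.band a 1 = 0
    · rw [List.foldl_cons, if_neg (by simp [h]), ih]
      simp [pvOdd, pvSh, h]
    · rw [List.foldl_cons, if_pos h, ih]
      simp [pvOdd, pvSh, h]

theorem pv_sorted_filter (family : List Int) (p : Int → Bool) :
    PySem.List.sorted ((family.filter p).map pvSh) (fun x => x) false
      = ((PySem.List.sorted family pvSh false).filter p).map pvSh := by
  apply PySem.List.sorted_id_eq_of_perm_of_pairwise
  · exact ((PySem.List.sorted_perm family pvSh false).filter p).map pvSh
  · have hp : (PySem.List.sorted family pvSh false).Pairwise (fun a b => pvSh a ≤ pvSh b) :=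
      PySem.List.sorted_pairwise family pvSh
    exact (hp.filter p).map pvSh (fun a b h => h)

-- ===== VERDICT (by name: the statement is the Claim_ definition above) =====
theorem section_split_at_zero_spec : Claim_equal_section_split_at_zero := by
  intro family _
  unfold Spec_section_split_at_zero section_split_at_zero section_split_at_zero_alt
  rw [pv_fold_part family [] [], pv_fold_part (PySem.List.sorted family (fun m => m >>> 1) false) [] []]
  simp only [List.nil_append]
  show _ = ((PySem.List.sorted family pvSh false).filter pvOdd |>.map pvSh,
            (PySem.List.sorted family pvSh false).filter (fun m => !pvOdd m) |>.map pvSh)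
  rw [← pv_sorted_filter family pvOdd, ← pv_sorted_filter family (fun m => !pvOdd m)]
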